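-- pv_equiv track=rewrite | github.com/ericzhang98/competitive | codejam/kickstart_2022/round_b/c.py | solution
-- ===== SOURCE A (Python) =====
-- import functools
--
-- def solution(n, d, v):
--     @functools.lru_cache(None)
--     def dp(i, j, target):
--         while i < n and v[i] == target:
--             i+= 1
--         while j >= 0 and v[j] == target:
--             j -= 1
--         if j < i:
--             return 0
--         diffi = min((v[i] - target) % d, (target - v[i]) % d)
--         diffj = min((v[j] - target) % d, (target - v[j]) % d)
--         cand1 = diffi + dp(i+1, j, v[i])
--         cand2 = diffj + dp(i, j-1, v[j])
--         best = min(cand1, cand2)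
--         return best
--     ans = dp(0, n-1, 0)
--     return ans
-- ===== SOURCE B (Python) =====
-- def solution(n, d, v):
--     # Bottom-up iterative interval DP instead of memoized recursion: intervals by
--     # increasing length; each interval stores its answer for the only reachable
--     # outside targets (v[i-1] and v[j+1]); the full range is read off at target 0.
--     def entry(dp, i, j, t):
--         while i < n and v[i] == t:
--             i += 1
--         while j >= 0 and v[j] == t:
--             j -= 1
--         if j < i:
--             return 0
--         c1 = min((v[i] - t) % d, (t - v[i]) % d) + dp.get((i + 1, j, v[i]), 0)
--         c2 = min((v[j] - t) % d, (t - v[j]) % d) + dp.get((i, j - 1, v[j]), 0)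
--         return min(c1, c2)
--
--     dp = {}
--     for L in range(1, n + 1):
--         for i in range(0, n - L + 1):
--             j = i + L - 1
--             ts = []
--             if i > 0:
--                 ts.append(v[i - 1])
--             if j < n - 1:
--                 ts.append(v[j + 1])
--             for t in ts:
--                 dp[(i, j, t)] = entry(dp, i, j, t)
--     return entry(dp, 0, n - 1, 0)
-- ===== Notes on version B (the rewrite author's own statement) =====
-- stated objective: alternative
-- what changed: Replaced the lru_cache-memoized top-down recursion by a bottom-up iterative interval DP: a table over intervals ordered by increasing length stores, for each interval, the answer for its only reachable outside targets (v[i-1], v[j+1]), and the full range is read off at target 0.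
import Mathlib
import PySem

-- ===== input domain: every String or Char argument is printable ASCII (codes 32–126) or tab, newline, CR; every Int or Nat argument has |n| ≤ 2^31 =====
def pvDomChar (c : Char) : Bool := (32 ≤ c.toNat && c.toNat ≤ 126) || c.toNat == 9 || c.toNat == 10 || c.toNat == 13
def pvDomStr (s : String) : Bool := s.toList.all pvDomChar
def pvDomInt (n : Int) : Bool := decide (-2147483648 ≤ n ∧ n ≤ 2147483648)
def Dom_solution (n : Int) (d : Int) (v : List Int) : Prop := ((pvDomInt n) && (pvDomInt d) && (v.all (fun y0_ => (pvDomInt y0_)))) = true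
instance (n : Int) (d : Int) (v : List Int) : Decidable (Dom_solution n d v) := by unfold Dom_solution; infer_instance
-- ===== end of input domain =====

-- B replaces A's lru_cache-memoized top-down recursion by a bottom-up iterative
-- interval DP table (intervals in increasing length, keyed by their reachable
-- outside targets); return values agree on Pre_ — an alternative decomposition.

-- ===== PORT A =====
-- shared with port B: both Pythons read v[i] and compute min((x-t)%d,(t-x)%d)
-- and both contain the identical pair of skipping while-loops.
def pvGet0 (v : List Int) (i : Int) : Int := PySem.List.pyGetD v i 0

def pvCost (d x t : Int) : Int := min (PySem.Int.mod (x - t) d) (PySem.Int.mod (t - x) d)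

-- `while i < n and v[i] == target: i += 1`
def skipL (n : Int) (v : List Int) (i t : Int) : Int :=
  if i < n ∧ pvGet0 v i = t then skipL n v (i + 1) t else i
termination_by (n - i).toNat
decreasing_by omega

-- `while j >= 0 and v[j] == target: j -= 1`
def skipR (v : List Int) (j t : Int) : Int :=
  if 0 ≤ j ∧ pvGet0 v j = t then skipR v (j - 1) t else j
termination_by (j + 1).toNat
decreasing_by omega

theorem skipL_ge (n : Int) (v : List Int) (i t : Int) : i ≤ skipL n v i t := by
  rw [skipL]
  split
  · have := skipL_ge n v (i + 1) t; omega
  · omega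
termination_by (n - i).toNat
decreasing_by omega

theorem skipR_le (v : List Int) (j t : Int) : skipR v j t ≤ j := by
  rw [skipR]
  split
  · have := skipR_le v (j - 1) t; omega
  · omega
termination_by (j + 1).toNat
decreasing_by omega

-- the memoized recursion dp(i, j, target) of A (memoization is value-transparent)
def dpA (n d : Int) (v : List Int) (i j t : Int) : Int :=
  let i' := skipL n v i t
  let j' := skipR v j t
  if j' < i' then 0
  else
    let diffi := pvCost d (pvGet0 v i') t
    let diffj := pvCost d (pvGet0 v j') t
    let cand1 := diffi + dpA n d v (i' + 1) j' (pvGet0 v i')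
    let cand2 := diffj + dpA n d v i' (j' - 1) (pvGet0 v j')
    min cand1 cand2
termination_by (j - i + 1).toNat
decreasing_by
  · have h1 := skipL_ge n v i t; have h2 := skipR_le v j t; omega
  · have h1 := skipL_ge n v i t; have h2 := skipR_le v j t; omega

def solution (n : Int) (d : Int) (v : List Int) : Int := dpA n d v 0 (n - 1) 0

-- ===== PORT B =====
-- `entry(dp, i, j, t)` of Source B
def entryB (n d : Int) (v : List Int) (dp : PySem.Dict (Int × Int × Int) Int) (i j t : Int) : Int :=
  let i' := skipL n v i t
  let j' := skipR v j t
  if j' < i' then 0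
  else
    let c1 := pvCost d (pvGet0 v i') t + dp.getD (i' + 1, j', pvGet0 v i') 0
    let c2 := pvCost d (pvGet0 v j') t + dp.getD (i', j' - 1, pvGet0 v j') 0
    min c1 c2

-- body of `for i in range(0, n - L + 1)`: store the interval [i, i+L-1] under
-- its reachable targets v[i-1] / v[j+1]
def pvStoreI (n d : Int) (v : List Int) (L : Int) (dp : PySem.Dict (Int × Int × Int) Int) (i : Int) :
    PySem.Dict (Int × Int × Int) Int :=
  let j := i + L - 1
  let ts := (if 0 < i then [pvGet0 v (i - 1)] else []) ++ (if j < n - 1 then [pvGet0 v (j + 1)] else [])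
  ts.foldl (fun dp t => dp.insert (i, j, t) (entryB n d v dp i j t)) dp

-- body of `for L in range(1, n + 1)`
def pvLenL (n d : Int) (v : List Int) (dp : PySem.Dict (Int × Int × Int) Int) (L : Int) :
    PySem.Dict (Int × Int × Int) Int :=
  (PySem.List.pyRange 0 (n - L + 1) 1).foldl (pvStoreI n d v L) dp

def solution_alt (n : Int) (d : Int) (v : List Int) : Int :=
  let dp := (PySem.List.pyRange 1 (n + 1) 1).foldl (pvLenL n d v) PySem.Dict.empty
  entryB n d v dp 0 (n - 1) 0

-- ===== PRECONDITION & SPEC =====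
-- Pre_ excludes exactly the inputs where the Python A raises: n > len(v)
-- (IndexError while scanning) and d = 0 with a nonzero among the first n
-- elements (ZeroDivisionError); B raises there too.
def Pre_solution (n : Int) (d : Int) (v : List Int) : Prop :=
  n ≤ (v.length : Int) ∧ (d ≠ 0 ∨ ∀ x ∈ v.take n.toNat, x = 0)
instance (n : Int) (d : Int) (v : List Int) : Decidable (Pre_solution n d v) := by
  unfold Pre_solution; infer_instance

def pvWitness_solution : Int × Int × List Int := (3, 2, [1, 5, 2])

def Spec_solution (n : Int) (d : Int) (v : List Int) (out : Int) : Prop := out = solution_alt n d v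
instance (n : Int) (d : Int) (v : List Int) (out : Int) : Decidable (Spec_solution n d v out) := by
  unfold Spec_solution; infer_instance

-- ===== CLAIM (what is proved, stated in full; the proofs are below) =====
def Claim_equal_solution : Prop := ∀ (n : Int) (d : Int) (v : List Int), Dom_solution n d v → Pre_solution n d v → Spec_solution n d v (solution n d v)

-- ===== LEMMAS AND PROOFS =====

-- every stored entry is a nonempty interval carrying its dp value
def Inv1 (n d : Int) (v : List Int) (dp : PySem.Dict (Int × Int × Int) Int) : Prop :=
  ∀ a b t val, dp.get? (a, b, t) = some val → a ≤ b ∧ val = dpA n d v a b t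

-- all in-range intervals of length ≤ M are present under their reachable targets
def Pres (n : Int) (v : List Int) (dp : PySem.Dict (Int × Int × Int) Int) (M : Int) : Prop :=
  ∀ a b : Int, 0 ≤ a → a ≤ b → b ≤ n - 1 → b - a + 1 ≤ M →
    (0 < a → (dp.get? (a, b, pvGet0 v (a - 1))).isSome) ∧
    (b < n - 1 → (dp.get? (a, b, pvGet0 v (b + 1))).isSome)

theorem dpA_empty (n d : Int) (v : List Int) (i j t : Int) (h : j < i) : dpA n d v i j t = 0 := by
  rw [dpA]
  have h1 := skipL_ge n v i t
  have h2 := skipR_le v j t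
  simp only []
  rw [if_pos (by omega)]

theorem entry_correct (n d : Int) (v : List Int) (dp : PySem.Dict (Int × Int × Int) Int) (M a b t : Int)
    (hInv : Inv1 n d v dp) (hPres : Pres n v dp M)
    (ha : 0 ≤ a) (hb : b ≤ n - 1) (hlen : b - a ≤ M) :
    entryB n d v dp a b t = dpA n d v a b t := by
  rw [entryB, dpA]
  have hi := skipL_ge n v a t
  have hj := skipR_le v b t
  simp only []
  set i' := skipL n v a t with hi'
  set j' := skipR v b t with hj'
  by_cases hlt : j' < i'
  · rw [if_pos hlt, if_pos hlt]
  · rw [if_neg hlt, if_neg hlt]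
    have e1 : dp.getD (i' + 1, j', pvGet0 v i') 0 = dpA n d v (i' + 1) j' (pvGet0 v i') := by
      by_cases hne : i' + 1 ≤ j'
      · have hp := (hPres (i' + 1) j' (by omega) hne (by omega) (by omega)).1 (by omega)
        obtain ⟨val, hval⟩ := Option.isSome_iff_exists.mp hp
        have heq : i' + 1 - 1 = i' := by omega
        rw [heq] at hval
        rw [PySem.Dict.getD_of_get?_eq_some dp 0 hval]
        exact ((hInv _ _ _ _ hval).2)
      · cases hg : dp.get? (i' + 1, j', pvGet0 v i') with
        | none =>
          rw [PySem.Dict.getD_of_get?_eq_none dp 0 hg, dpA_empty n d v _ _ _ (by omega)]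
        | some val => exact absurd ((hInv _ _ _ _ hg).1) (by omega)
    have e2 : dp.getD (i', j' - 1, pvGet0 v j') 0 = dpA n d v i' (j' - 1) (pvGet0 v j') := by
      by_cases hne : i' ≤ j' - 1
      · have hp := (hPres i' (j' - 1) (by omega) hne (by omega) (by omega)).2 (by omega)
        obtain ⟨val, hval⟩ := Option.isSome_iff_exists.mp hp
        have heq : j' - 1 + 1 = j' := by omega
        rw [heq] at hval
        rw [PySem.Dict.getD_of_get?_eq_some dp 0 hval]
        exact ((hInv _ _ _ _ hval).2)
      · cases hg : dp.get? (i', j' - 1, pvGet0 v j') with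
        | none =>
          rw [PySem.Dict.getD_of_get?_eq_none dp 0 hg, dpA_empty n d v _ _ _ (by omega)]
        | some val => exact absurd ((hInv _ _ _ _ hg).1) (by omega)
    rw [e1, e2]

theorem Inv1_insert (n d : Int) (v : List Int) (dp : PySem.Dict (Int × Int × Int) Int)
    (a b t x : Int) (hInv : Inv1 n d v dp) (hab : a ≤ b) (hx : x = dpA n d v a b t) :
    Inv1 n d v (dp.insert (a, b, t) x) := by
  intro a' b' t' val h
  rw [PySem.Dict.get?_insert] at h
  split at h
  · rename_i heq
    obtain ⟨h1, h2, h3⟩ : a' = a ∧ b' = b ∧ t' = t := by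
      simpa [Prod.ext_iff] using heq
    subst h1; subst h2; subst h3
    refine ⟨hab, ?_⟩
    injection h with h
    omega
  · exact hInv _ _ _ _ h

theorem isSome_insert (dp : PySem.Dict (Int × Int × Int) Int) (k k' : Int × Int × Int) (x : Int)
    (h : (dp.get? k).isSome) : ((dp.insert k' x).get? k).isSome := by
  rw [PySem.Dict.get?_insert]
  split
  · simp
  · exact h

theorem Pres_mono (n : Int) (v : List Int) (dp dp' : PySem.Dict (Int × Int × Int) Int) (M : Int)
    (hm : ∀ k, (dp.get? k).isSome → (dp'.get? k).isSome) (h : Pres n v dp M) : Pres n v dp' M := by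
  intro a b ha hab hb hM
  obtain ⟨x, y⟩ := h a b ha hab hb hM
  exact ⟨fun h0 => hm _ (x h0), fun h0 => hm _ (y h0)⟩

theorem Pres_le (n : Int) (v : List Int) (dp : PySem.Dict (Int × Int × Int) Int) (M M' : Int)
    (h : Pres n v dp M) (hle : M' ≤ M) : Pres n v dp M' := by
  intro a b ha hab hb hM
  exact h a b ha hab hb (le_trans hM hle)

theorem insert_entry (n d : Int) (v : List Int) (dp : PySem.Dict (Int × Int × Int) Int)
    (M i j t : Int) (hInv : Inv1 n d v dp) (hPres : Pres n v dp M)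
    (hi : 0 ≤ i) (hij : i ≤ j) (hj : j ≤ n - 1) (hlen : j - i ≤ M) :
    Inv1 n d v (dp.insert (i, j, t) (entryB n d v dp i j t)) ∧
    Pres n v (dp.insert (i, j, t) (entryB n d v dp i j t)) M ∧
    (∀ k, (dp.get? k).isSome → ((dp.insert (i, j, t) (entryB n d v dp i j t)).get? k).isSome) := by
  have hval : entryB n d v dp i j t = dpA n d v i j t :=
    entry_correct n d v dp M i j t hInv hPres hi hj hlen
  refine ⟨Inv1_insert n d v dp i j t _ hInv hij hval, ?_, ?_⟩
  · exact Pres_mono n v dp _ M (fun k => isSome_insert dp k _ _) hPres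
  · exact fun k => isSome_insert dp k _ _

theorem pvStoreI_step (n d : Int) (v : List Int) (L M : Int)
    (dp : PySem.Dict (Int × Int × Int) Int) (i : Int)
    (hInv : Inv1 n d v dp) (hPres : Pres n v dp M) (hL : 1 ≤ L) (hM : L - 1 ≤ M)
    (hi : 0 ≤ i) (hj : i + L - 1 ≤ n - 1) :
    Inv1 n d v (pvStoreI n d v L dp i) ∧
    Pres n v (pvStoreI n d v L dp i) M ∧
    (∀ k, (dp.get? k).isSome → ((pvStoreI n d v L dp i).get? k).isSome) ∧
    (0 < i → ((pvStoreI n d v L dp i).get? (i, i + L - 1, pvGet0 v (i - 1))).isSome) ∧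
    (i + L - 1 < n - 1 → ((pvStoreI n d v L dp i).get? (i, i + L - 1, pvGet0 v (i + L - 1 + 1))).isSome) := by
  unfold pvStoreI
  simp only []
  by_cases h1 : 0 < i <;> by_cases h2 : i + L - 1 < n - 1
  · rw [if_pos h1, if_pos h2]
    simp only [List.singleton_append, List.foldl_cons, List.foldl_nil]
    obtain ⟨hI1, hP1, hm1⟩ := insert_entry n d v dp M i (i + L - 1) (pvGet0 v (i - 1))
      hInv hPres hi (by omega) hj (by omega)
    obtain ⟨hI2, hP2, hm2⟩ := insert_entry n d v _ M i (i + L - 1) (pvGet0 v (i + L - 1 + 1))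
      hI1 hP1 hi (by omega) hj (by omega)
    refine ⟨hI2, hP2, fun k hk => hm2 k (hm1 k hk), fun _ => ?_, fun _ => ?_⟩
    · exact hm2 _ (by rw [PySem.Dict.get?_insert_self]; rfl)
    · rw [PySem.Dict.get?_insert_self]; rfl
  · rw [if_pos h1, if_neg h2]
    simp only [List.append_nil, List.foldl_cons, List.foldl_nil]
    obtain ⟨hI1, hP1, hm1⟩ := insert_entry n d v dp M i (i + L - 1) (pvGet0 v (i - 1))
      hInv hPres hi (by omega) hj (by omega)
    refine ⟨hI1, hP1, hm1, fun _ => ?_, fun hc => absurd hc h2⟩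
    rw [PySem.Dict.get?_insert_self]; rfl
  · rw [if_neg h1, if_pos h2]
    simp only [List.nil_append, List.foldl_cons, List.foldl_nil]
    obtain ⟨hI1, hP1, hm1⟩ := insert_entry n d v dp M i (i + L - 1) (pvGet0 v (i + L - 1 + 1))
      hInv hPres hi (by omega) hj (by omega)
    refine ⟨hI1, hP1, hm1, fun hc => absurd hc h1, fun _ => ?_⟩
    rw [PySem.Dict.get?_insert_self]; rfl
  · rw [if_neg h1, if_neg h2]
    simp only [List.append_nil, List.foldl_nil]
    exact ⟨hInv, hPres, fun k hk => hk, fun hc => absurd hc h1, fun hc => absurd hc h2⟩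

theorem inner_fold (n d : Int) (v : List Int) (L M : Int) (hL : 1 ≤ L) (hM : L - 1 ≤ M) :
    ∀ (is : List Int) (dp : PySem.Dict (Int × Int × Int) Int),
      (∀ i ∈ is, 0 ≤ i ∧ i + L - 1 ≤ n - 1) → Inv1 n d v dp → Pres n v dp M →
      Inv1 n d v (is.foldl (pvStoreI n d v L) dp) ∧
      (∀ k, (dp.get? k).isSome → ((is.foldl (pvStoreI n d v L) dp).get? k).isSome) ∧
      (∀ i ∈ is,
        (0 < i → ((is.foldl (pvStoreI n d v L) dp).get? (i, i + L - 1, pvGet0 v (i - 1))).isSome) ∧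
        (i + L - 1 < n - 1 →
          ((is.foldl (pvStoreI n d v L) dp).get? (i, i + L - 1, pvGet0 v (i + L - 1 + 1))).isSome)) := by
  intro is
  induction is with
  | nil => intro dp _ hI hP; exact ⟨hI, fun k hk => hk, by simp⟩
  | cons a rest ih =>
    intro dp hb hI hP
    obtain ⟨ha0, ha1⟩ := hb a (List.mem_cons_self)
    obtain ⟨hI1, hP1, hm1, hk1, hk2⟩ := pvStoreI_step n d v L M dp a hI hP hL hM ha0 ha1
    obtain ⟨hI2, hm2, hpres2⟩ := ih (pvStoreI n d v L dp a)
      (fun i hi => hb i (List.mem_cons_of_mem a hi)) hI1 hP1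
    simp only [List.foldl_cons]
    refine ⟨hI2, fun k hk => hm2 k (hm1 k hk), ?_⟩
    intro i hi
    rcases List.mem_cons.mp hi with h | h
    · subst h
      exact ⟨fun h0 => hm2 _ (hk1 h0), fun h0 => hm2 _ (hk2 h0)⟩
    · exact hpres2 i h

theorem pvLenL_level (n d : Int) (v : List Int) (L : Int)
    (dp : PySem.Dict (Int × Int × Int) Int) (hL : 1 ≤ L)
    (hInv : Inv1 n d v dp) (hPres : Pres n v dp (L - 1)) :
    Inv1 n d v (pvLenL n d v dp L) ∧ Pres n v (pvLenL n d v dp L) L := by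
  unfold pvLenL
  have hmem : ∀ i ∈ PySem.List.pyRange 0 (n - L + 1) 1, 0 ≤ i ∧ i + L - 1 ≤ n - 1 := by
    intro i hi
    have := (PySem.List.mem_pyRange_one).mp hi
    omega
  obtain ⟨hI, hm, hpres⟩ := inner_fold n d v L (L - 1) hL le_rfl
    (PySem.List.pyRange 0 (n - L + 1) 1) dp hmem hInv hPres
  refine ⟨hI, ?_⟩
  intro a b ha hab hb hlen
  by_cases hsh : b - a + 1 ≤ L - 1
  · exact Pres_mono n v dp _ (L - 1) hm hPres a b ha hab hb hsh
  · have hbe : b = a + L - 1 := by omega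
    have hamem : a ∈ PySem.List.pyRange 0 (n - L + 1) 1 :=
      (PySem.List.mem_pyRange_one).mpr (by omega)
    obtain ⟨c1, c2⟩ := hpres a hamem
    subst hbe
    exact ⟨c1, c2⟩

theorem outer_fold (n d : Int) (v : List Int) : ∀ (L0 : Int) (dp : PySem.Dict (Int × Int × Int) Int),
    1 ≤ L0 → L0 ≤ n + 1 → Inv1 n d v dp → Pres n v dp (L0 - 1) →
    Inv1 n d v ((PySem.List.pyRange L0 (n + 1) 1).foldl (pvLenL n d v) dp) ∧
    Pres n v ((PySem.List.pyRange L0 (n + 1) 1).foldl (pvLenL n d v) dp) n := by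
  intro L0 dp h1 h2 hI hP
  by_cases hlt : L0 < n + 1
  · rw [PySem.List.pyRange_one_cons hlt]
    simp only [List.foldl_cons]
    obtain ⟨hI1, hP1⟩ := pvLenL_level n d v L0 dp h1 hI hP
    exact outer_fold n d v (L0 + 1) (pvLenL n d v dp L0) (by omega) (by omega) hI1
      (Pres_le n v _ L0 (L0 + 1 - 1) hP1 (by omega))
  · rw [PySem.List.pyRange_one_eq_nil (by omega)]
    simp only [List.foldl_nil]
    exact ⟨hI, Pres_le n v dp (L0 - 1) n hP (by omega)⟩
termination_by L0 _ => (n + 1 - L0).toNat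
decreasing_by omega

theorem Inv1_empty (n d : Int) (v : List Int) : Inv1 n d v PySem.Dict.empty := by
  intro a b t val h
  rw [PySem.Dict.get?_empty] at h
  cases h

theorem Pres_empty_zero (n : Int) (v : List Int) : Pres n v PySem.Dict.empty 0 := by
  intro a b ha hab hb hM
  omega

theorem AB_eq (n d : Int) (v : List Int) : solution n d v = solution_alt n d v := by
  unfold solution solution_alt
  simp only []
  by_cases hn : 1 ≤ n
  · obtain ⟨hI, hP⟩ := outer_fold n d v 1 PySem.Dict.empty le_rfl (by omega)
      (Inv1_empty n d v) (Pres_le n v _ 0 (1 - 1) (Pres_empty_zero n v) (by omega))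
    exact (entry_correct n d v _ n 0 (n - 1) 0 hI hP le_rfl le_rfl (by omega)).symm
  · rw [PySem.List.pyRange_one_eq_nil (by omega)]
    simp only [List.foldl_nil]
    exact (entry_correct n d v PySem.Dict.empty 0 0 (n - 1) 0 (Inv1_empty n d v)
      (Pres_empty_zero n v) le_rfl le_rfl (by omega)).symm

theorem solution_spec : Claim_equal_solution := by
  intro n d v _ _
  unfold Spec_solution
  exact AB_eq n d v
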